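-- pv_equiv track=rewrite | github.com/liutongling/DP | EverDay.py | isZeroArray0
-- ===== SOURCE A (Python) =====
-- def isZeroArray0(nums: list, queries: list) -> bool:
--     hashTable = {}
--     for i in queries:
--         for j in range(i[0],i[-1]+1):
--             if j not in hashTable.keys():
--                 hashTable[j] = 1
--             else:hashTable[j] += 1
--     flag = True
--     for i,value in enumerate(nums):
--         if i not in hashTable.keys():
--             if value !=0:
--                 flag = False
--                 break
--         elif hashTable[i] < value:
--             flag = False
--             break
--     return flag
-- ===== SOURCE B (Python) =====
-- def isZeroArray0(nums: list, queries: list) -> bool: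
--     # Difference array + running prefix sum: O(n + q) instead of O(sum of range lengths).
--     n = len(nums)
--     diff = [0] * (n + 1)
--     for q in queries:
--         lo = max(q[0], 0)
--         hi = min(q[-1], n - 1)
--         if lo <= hi:
--             diff[lo] += 1
--             diff[hi + 1] -= 1
--     cnt = 0
--     for i, v in enumerate(nums):
--         cnt += diff[i]
--         if cnt == 0:
--             if v != 0:
--                 return False
--         elif cnt < v:
--             return False
--     return True
-- ===== Notes on version B (the rewrite author's own statement) =====
-- stated objective: faster
-- what changed: Replaced the per-query enumeration of every covered index into a counting dict by a difference array over [0,n] with a running prefix sum during the single check pass.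
import Mathlib
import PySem

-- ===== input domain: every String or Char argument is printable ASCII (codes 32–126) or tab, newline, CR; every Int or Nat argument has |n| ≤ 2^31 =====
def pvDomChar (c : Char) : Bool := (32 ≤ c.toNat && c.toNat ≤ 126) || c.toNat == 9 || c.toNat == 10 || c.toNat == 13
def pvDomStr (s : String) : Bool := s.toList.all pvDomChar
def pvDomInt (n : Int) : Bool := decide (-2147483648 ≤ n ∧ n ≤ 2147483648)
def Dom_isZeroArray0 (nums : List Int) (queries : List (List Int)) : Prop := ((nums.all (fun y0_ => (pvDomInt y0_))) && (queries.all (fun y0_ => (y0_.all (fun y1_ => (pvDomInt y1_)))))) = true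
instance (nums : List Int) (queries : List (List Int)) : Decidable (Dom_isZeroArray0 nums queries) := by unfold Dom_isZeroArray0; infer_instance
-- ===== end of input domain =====

-- B replaces A's per-index counting dict (one dict bump per covered index per query) by a
-- difference array over [0,n] with a running prefix sum during the single check pass.
-- Return-value equivalence only; neither version mutates its arguments.

-- ===== PORT A =====
-- The counting dict is backed by Std.HashMap (Python's dict is a hash table; A never iterates it,
-- only get/insert/contains, so this is exact and keeps the literal per-index loop evaluable).
-- inner dict update: if j not in hashTable: hashTable[j]=1 else hashTable[j]+=1
def bumpA (d : Std.HashMap Int Int) (j : Int) : Std.HashMap Int Int :=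
  match d[j]? with
  | none => d.insert j 1
  | some v => d.insert j (v + 1)

-- one query: for j in range(i[0], i[-1]+1): bump  (i[0]/i[-1] via pyGetD, exact under Pre_: queries nonempty)
def addRangeA (d : Std.HashMap Int Int) (i : List Int) : Std.HashMap Int Int :=
  (PySem.List.pyRange (PySem.List.pyGetD i 0 0) (PySem.List.pyGetD i (-1) 0 + 1) 1).foldl bumpA d

-- second loop with break: early-exit recursion over enumerate(nums)
def checkA (d : Std.HashMap Int Int) : List (Int × Int) → Bool
  | [] => true
  | (i, v) :: rest =>
    match d[i]? with
    | none => if v ≠ 0 then false else checkA d rest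
    | some c => if c < v then false else checkA d rest

def isZeroArray0 (nums : List Int) (queries : List (List Int)) : Bool :=
  checkA (queries.foldl addRangeA (∅ : Std.HashMap Int Int)) (PySem.List.enumerate nums 0)

-- ===== PORT B =====
-- diff[i] += delta  (index always in range when called)
def bumpB (diff : List Int) (i : Nat) (delta : Int) : List Int :=
  diff.set i (diff.getD i 0 + delta)

-- one query: clamp to [0, n-1], mark the difference array
def stepB (n : Nat) (diff : List Int) (q : List Int) : List Int :=
  if max (PySem.List.pyGetD q 0 0) 0 ≤ min (PySem.List.pyGetD q (-1) 0) ((n : Int) - 1) then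
    bumpB (bumpB diff (max (PySem.List.pyGetD q 0 0) 0).toNat 1)
      ((min (PySem.List.pyGetD q (-1) 0) ((n : Int) - 1)).toNat + 1) (-1)
  else diff

def buildDiff (n : Nat) (queries : List (List Int)) : List Int :=
  queries.foldl (stepB n) (List.replicate (n + 1) 0)

-- the check pass with the running prefix sum cnt
def checkB (diff : List Int) : Int → Nat → List Int → Bool
  | _, _, [] => true
  | cnt, i, v :: rest =>
    let c := cnt + diff.getD i 0
    if c = 0 then (if v ≠ 0 then false else checkB diff c (i + 1) rest)
    else if c < v then false else checkB diff c (i + 1) rest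

def isZeroArray0_alt (nums : List Int) (queries : List (List Int)) : Bool :=
  checkB (buildDiff nums.length queries) 0 0 nums

-- ===== PRECONDITION & SPEC =====
-- Pre_ excludes exactly the inputs where Python A raises: an empty query makes i[0] an IndexError
-- (B raises there too).
def Pre_isZeroArray0 (nums : List Int) (queries : List (List Int)) : Prop :=
  ∀ q ∈ queries, q ≠ []
instance (nums : List Int) (queries : List (List Int)) : Decidable (Pre_isZeroArray0 nums queries) := by unfold Pre_isZeroArray0; infer_instance

def pvWitness_isZeroArray0 : List Int × List (List Int) := ([1, 0, 2], [[0, 2], [1, 1], [2]])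

def Spec_isZeroArray0 (nums : List Int) (queries : List (List Int)) (out : Bool) : Prop := out = isZeroArray0_alt nums queries
instance (nums : List Int) (queries : List (List Int)) (out : Bool) : Decidable (Spec_isZeroArray0 nums queries out) := by unfold Spec_isZeroArray0; infer_instance

-- ===== CLAIM (what is proved, stated in full; the proofs are below) =====
def Claim_equal_isZeroArray0 : Prop := ∀ (nums : List Int) (queries : List (List Int)), Dom_isZeroArray0 nums queries → Pre_isZeroArray0 nums queries → Spec_isZeroArray0 nums queries (isZeroArray0 nums queries)

-- ===== LEMMAS AND PROOFS =====

-- coverage count of index j by the queries (both programs' common semantics)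
def cov (qs : List (List Int)) (j : Int) : Int :=
  (qs.map (fun q => if PySem.List.pyGetD q 0 0 ≤ j ∧ j ≤ PySem.List.pyGetD q (-1) 0 then (1 : Int) else 0)).sum

-- the per-index acceptance test both programs implement
def okCV (c v : Int) : Bool := if c = 0 then decide (v = 0) else decide (¬ c < v)

theorem cov_cons (q : List Int) (qs : List (List Int)) (j : Int) :
    cov (q :: qs) j =
      (if PySem.List.pyGetD q 0 0 ≤ j ∧ j ≤ PySem.List.pyGetD q (-1) 0 then (1 : Int) else 0) + cov qs j := by
  simp [cov]

theorem cov_nonneg (qs : List (List Int)) (j : Int) : 0 ≤ cov qs j := by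
  induction qs with
  | nil => simp [cov]
  | cons q qs ih => rw [cov_cons]; split_ifs <;> omega

theorem bumpA_eq (d : Std.HashMap Int Int) (j : Int) :
    bumpA d j = d.insert j (d.getD j 0 + 1) := by
  unfold bumpA
  cases h : d[j]? with
  | none => simp [Std.HashMap.getD_eq_getD_getElem?, h]
  | some v => simp [Std.HashMap.getD_eq_getD_getElem?, h]

theorem foldl_bumpA (l : List Int) (d : Std.HashMap Int Int) :
    l.foldl bumpA d = l.foldl (fun d x => d.insert x (d.getD x 0 + 1)) d := by
  have h : bumpA = fun d x => d.insert x (d.getD x 0 + 1) := funext fun d => funext fun x => bumpA_eq d x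
  rw [h]

theorem count_pyRange (a b j : Int) :
    ((PySem.List.pyRange a b 1).count j : Int) = if a ≤ j ∧ j < b then 1 else 0 := by
  by_cases h : a ≤ j ∧ j < b
  · have hm : j ∈ PySem.List.pyRange a b 1 := PySem.List.mem_pyRange_one.mpr h
    have h1 : (PySem.List.pyRange a b 1).count j ≤ 1 :=
      List.nodup_iff_count_le_one.mp (PySem.List.nodup_pyRange_one a b) j
    have h2 : 0 < (PySem.List.pyRange a b 1).count j := List.count_pos_iff.mpr hm
    simp [h]; omega
  · have hm : j ∉ PySem.List.pyRange a b 1 := fun hc => h (PySem.List.mem_pyRange_one.mp hc)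
    simp [h, List.count_eq_zero_of_not_mem hm]

theorem getD_foldl_insert (l : List Int) (d : Std.HashMap Int Int) (j : Int) :
    (l.foldl (fun d x => d.insert x (d.getD x 0 + 1)) d).getD j 0 = d.getD j 0 + (l.count j : Int) := by
  induction l generalizing d with
  | nil => simp
  | cons x xs ih =>
    simp only [List.foldl_cons, ih, Std.HashMap.getD_insert, List.count_cons]
    by_cases h1 : x = j <;> simp [h1] <;> push_cast <;> ring

theorem contains_foldl_insert (l : List Int) (d : Std.HashMap Int Int) (j : Int) :
    (l.foldl (fun d x => d.insert x (d.getD x 0 + 1)) d).contains j = (d.contains j || decide (j ∈ l)) := by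
  induction l generalizing d with
  | nil => simp
  | cons x xs ih =>
    simp only [List.foldl_cons, ih, Std.HashMap.contains_insert]
    by_cases h1 : x = j
    · simp [h1]
    · have h1' : ¬ j = x := fun hh => h1 hh.symm
      by_cases h2 : j ∈ xs <;> simp [h1, h1', h2, List.mem_cons]

theorem getD_addRangeA (d : Std.HashMap Int Int) (q : List Int) (j : Int) :
    (addRangeA d q).getD j 0 =
      d.getD j 0 + (if PySem.List.pyGetD q 0 0 ≤ j ∧ j ≤ PySem.List.pyGetD q (-1) 0 then (1 : Int) else 0) := by
  unfold addRangeA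
  rw [foldl_bumpA, getD_foldl_insert, count_pyRange]
  congr 1
  split_ifs <;> first | rfl | omega

theorem contains_addRangeA (d : Std.HashMap Int Int) (q : List Int) (j : Int) :
    (addRangeA d q).contains j =
      (d.contains j || decide (PySem.List.pyGetD q 0 0 ≤ j ∧ j ≤ PySem.List.pyGetD q (-1) 0)) := by
  unfold addRangeA
  rw [foldl_bumpA, contains_foldl_insert]
  congr 1
  simp only [decide_eq_decide, PySem.List.mem_pyRange_one]
  omega

theorem getD_foldQ (qs : List (List Int)) (d : Std.HashMap Int Int) (j : Int) :
    (qs.foldl addRangeA d).getD j 0 = d.getD j 0 + cov qs j := by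
  induction qs generalizing d with
  | nil => simp [cov]
  | cons q qs ih =>
    rw [List.foldl_cons, ih, getD_addRangeA, cov_cons]
    ring

theorem contains_foldQ (qs : List (List Int)) (d : Std.HashMap Int Int) (j : Int) :
    (qs.foldl addRangeA d).contains j = (d.contains j || decide (0 < cov qs j)) := by
  induction qs generalizing d with
  | nil => simp [cov]
  | cons q qs ih =>
    rw [List.foldl_cons, ih, contains_addRangeA, cov_cons]
    have h1 := cov_nonneg qs j
    by_cases h : PySem.List.pyGetD q 0 0 ≤ j ∧ j ≤ PySem.List.pyGetD q (-1) 0 <;>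
      by_cases h2 : 0 < cov qs j <;>
      simp [h, h2] <;> omega

theorem checkA_eq (qs : List (List Int)) (l : List (Int × Int)) :
    checkA (qs.foldl addRangeA (∅ : Std.HashMap Int Int)) l = l.all (fun p => okCV (cov qs p.1) p.2) := by
  induction l with
  | nil => rfl
  | cons p rest ih =>
    obtain ⟨i, v⟩ := p
    have hgd : (qs.foldl addRangeA (∅ : Std.HashMap Int Int)).getD i 0 = cov qs i := by
      rw [getD_foldQ]; simp
    have hct : (qs.foldl addRangeA (∅ : Std.HashMap Int Int)).contains i = decide (0 < cov qs i) := by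
      rw [contains_foldQ]; simp
    rw [show checkA (qs.foldl addRangeA (∅ : Std.HashMap Int Int)) ((i, v) :: rest) =
        (match (qs.foldl addRangeA (∅ : Std.HashMap Int Int))[i]? with
         | none => if v ≠ 0 then false else checkA (qs.foldl addRangeA (∅ : Std.HashMap Int Int)) rest
         | some c => if c < v then false else checkA (qs.foldl addRangeA (∅ : Std.HashMap Int Int)) rest) from rfl]
    cases h : (qs.foldl addRangeA (∅ : Std.HashMap Int Int))[i]? with
    | none =>
      have hc0 : cov qs i = 0 := by
        have hcf : (qs.foldl addRangeA (∅ : Std.HashMap Int Int)).contains i = false := by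
          rw [Std.HashMap.contains_eq_isSome_getElem?, h]; rfl
        rw [hct] at hcf
        have := cov_nonneg qs i
        simp at hcf; omega
      simp only [List.all_cons, ih, okCV, hc0]
      by_cases hv : v = 0 <;> simp [hv]
    | some c =>
      have hcc : c = cov qs i := by
        rw [← hgd, Std.HashMap.getD_eq_getD_getElem?, h]; rfl
      have hpos : 0 < cov qs i := by
        have hcf : (qs.foldl addRangeA (∅ : Std.HashMap Int Int)).contains i = true := by
          rw [Std.HashMap.contains_eq_isSome_getElem?, h]; rfl
        rw [hct] at hcf; simpa using hcf
      simp only [List.all_cons, ih, okCV, hcc]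
      have hne : ¬ cov qs i = 0 := by omega
      by_cases hlt : cov qs i < v <;> simp [hlt, hne]

-- sum of a prefix after a point update
theorem sum_take_set (l : List Int) (i m : Nat) (x : Int) (h : i < l.length) :
    ((l.set i x).take m).sum = (l.take m).sum + (if i < m then x - l.getD i 0 else 0) := by
  induction l generalizing i m with
  | nil => simp at h
  | cons a t ih =>
    cases m with
    | zero => simp
    | succ m =>
      cases i with
      | zero =>
        simp only [List.set_cons_zero, List.take_succ_cons, List.sum_cons, List.getD_cons_zero]
        have h01 : (0 : Nat) < m + 1 := Nat.succ_pos m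
        rw [if_pos h01]
        ring
      | succ i =>
        simp only [List.set_cons_succ, List.take_succ_cons, List.sum_cons]
        rw [ih i m (by simpa using h)]
        simp only [List.getD_cons_succ]
        simp only [Nat.add_lt_add_iff_right]
        ring

theorem length_bumpB (diff : List Int) (i : Nat) (delta : Int) :
    (bumpB diff i delta).length = diff.length := by
  simp [bumpB]

theorem sum_take_bumpB (diff : List Int) (i m : Nat) (delta : Int) (h : i < diff.length) :
    ((bumpB diff i delta).take m).sum = (diff.take m).sum + (if i < m then delta else 0) := by
  unfold bumpB
  rw [sum_take_set _ _ _ _ h]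
  split_ifs <;> ring

theorem length_stepB (n : Nat) (diff : List Int) (q : List Int) :
    (stepB n diff q).length = diff.length := by
  unfold stepB
  split_ifs <;> simp [length_bumpB]

theorem sum_take_stepB (n : Nat) (diff : List Int) (q : List Int) (k : Nat)
    (hlen : diff.length = n + 1) (hk : k < n) :
    ((stepB n diff q).take (k + 1)).sum =
      (diff.take (k + 1)).sum +
      (if PySem.List.pyGetD q 0 0 ≤ (k : Int) ∧ (k : Int) ≤ PySem.List.pyGetD q (-1) 0 then (1 : Int) else 0) := by
  unfold stepB
  set l := PySem.List.pyGetD q 0 0 with hl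
  set r := PySem.List.pyGetD q (-1) 0 with hr
  by_cases hcl : max l 0 ≤ min r ((n : Int) - 1)
  · have h0 : (0 : Int) ≤ max l 0 := le_max_right l 0
    have hlo : (max l 0).toNat < diff.length := by
      rw [hlen]; omega
    have hhi : (min r ((n : Int) - 1)).toNat + 1 < diff.length := by
      rw [hlen]; omega
    simp only [hcl, if_pos]
    rw [sum_take_bumpB _ _ _ _ (by rw [length_bumpB]; exact hhi),
        sum_take_bumpB _ _ _ _ hlo]
    have e1 : ((max l 0).toNat : Int) = max l 0 := Int.toNat_of_nonneg h0
    have e2 : ((min r ((n : Int) - 1)).toNat : Int) = min r ((n : Int) - 1) := by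
      apply Int.toNat_of_nonneg; omega
    split_ifs <;> omega
  · simp only [hcl, if_neg, not_false_iff]
    have : ¬ (l ≤ (k : Int) ∧ (k : Int) ≤ r) := by
      intro ⟨h1, h2⟩
      have : (0 : Int) ≤ (k : Int) := Int.natCast_nonneg k
      omega
    simp [this]

theorem length_foldl_stepB (n : Nat) (qs : List (List Int)) (diff : List Int) :
    (qs.foldl (stepB n) diff).length = diff.length := by
  induction qs generalizing diff with
  | nil => rfl
  | cons q qs ih => rw [List.foldl_cons, ih, length_stepB]

theorem sum_take_foldl_stepB (n : Nat) (qs : List (List Int)) (diff : List Int) (k : Nat)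
    (hlen : diff.length = n + 1) (hk : k < n) :
    ((qs.foldl (stepB n) diff).take (k + 1)).sum = (diff.take (k + 1)).sum + cov qs (k : Int) := by
  induction qs generalizing diff with
  | nil => simp [cov]
  | cons q qs ih =>
    rw [List.foldl_cons, ih _ (by rw [length_stepB]; exact hlen) ,
        sum_take_stepB n diff q k hlen hk, cov_cons]
    ring

theorem sum_take_buildDiff (n : Nat) (qs : List (List Int)) (k : Nat) (hk : k < n) :
    ((buildDiff n qs).take (k + 1)).sum = cov qs (k : Int) := by
  unfold buildDiff
  rw [sum_take_foldl_stepB n qs _ k (by simp) hk]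
  rw [List.take_replicate, List.sum_replicate]
  simp

theorem checkB_eq (n : Nat) (D : List Int) (hD : D.length = n + 1)
    (qs : List (List Int))
    (hcov : ∀ k : Nat, k < n → (D.take (k + 1)).sum = cov qs (k : Int)) :
    ∀ (vs : List Int) (i : Nat) (cnt : Int), i + vs.length ≤ n → cnt = (D.take i).sum →
      checkB D cnt i vs = (PySem.List.enumerate vs (i : Int)).all (fun p => okCV (cov qs p.1) p.2) := by
  intro vs
  induction vs with
  | nil => intro i cnt _ _; simp [checkB, PySem.List.enumerate_nil]
  | cons v rest ih =>
    intro i cnt hle hcnt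
    have hi : i < n := by simp at hle; omega
    have hiD : i < D.length := by omega
    have hsum : cnt + D.getD i 0 = (D.take (i + 1)).sum := by
      rw [List.take_add_one, List.sum_append, hcnt]
      simp [List.getElem?_eq_getElem hiD, List.getD_eq_getElem?_getD]
    have hstep : cnt + D.getD i 0 = cov qs (i : Int) := by
      rw [hsum, hcov i hi]
    rw [PySem.List.enumerate_cons, List.all_cons]
    have hrec := ih (i + 1) (cnt + D.getD i 0)
      (by simp at hle ⊢; omega) hsum
    rw [show ((i : Int) + 1) = ((i + 1 : Nat) : Int) by push_cast; ring]
    show (if cnt + D.getD i 0 = 0 then (if v ≠ 0 then false else checkB D (cnt + D.getD i 0) (i + 1) rest)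
          else if cnt + D.getD i 0 < v then false else checkB D (cnt + D.getD i 0) (i + 1) rest)
        = (okCV (cov qs (i : Int)) v && (PySem.List.enumerate rest ((i + 1 : Nat) : Int)).all (fun p => okCV (cov qs p.1) p.2))
    rw [hrec, hstep, okCV]
    by_cases h0 : cov qs (i : Int) = 0
    · by_cases hv : v = 0 <;> simp [h0, hv]
    · by_cases hlt : cov qs (i : Int) < v <;> simp [h0, hlt]

-- ===== VERDICT (by name: the statement is the Claim_ definition above) =====
theorem isZeroArray0_spec : Claim_equal_isZeroArray0 := by
  intro nums queries _hdom _hpre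
  unfold Spec_isZeroArray0 isZeroArray0 isZeroArray0_alt
  rw [checkA_eq queries (PySem.List.enumerate nums 0)]
  rw [checkB_eq nums.length (buildDiff nums.length queries)
        (by unfold buildDiff; rw [length_foldl_stepB]; simp)
        queries
        (fun k hk => sum_take_buildDiff nums.length queries k hk)
        nums 0 0 (by simp) (by simp)]
  rfl
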